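-- pv_equiv track=rewrite | github.com/ffeiler/aoc | solutions/2024/5.py | f
-- ===== SOURCE A (Python) =====
-- def f(order, updates):
--     correct_updates = []
--     for update in updates:
--         correct = True
--         for i in range(len(update) - 1):
--             for j in range(i + 1, len(update) - 1):
--                 if order.get(update[i]) == update[j]:
--                     correct = False
--                     break
--         if correct:
--             correct_updates.append(update)
--     return correct_updates
-- ===== SOURCE B (Python) =====
-- def f(order, updates):
--     correct_updates = []
--     for update in updates:
--         seen = set()
--         ok = True
--         for x in reversed(update[:-1]):
--             if order.get(x) in seen:
--                 ok = False
--                 break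
--             seen.add(x)
--         if ok:
--             correct_updates.append(update)
--     return correct_updates
-- ===== Notes on version B (the rewrite author's own statement) =====
-- stated objective: faster
-- what changed: Replaced A's nested i<j pair scan per update with a single reverse pass over update[:-1] that keeps a set of already-seen later elements and does one set-membership test per element.
import Mathlib
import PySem

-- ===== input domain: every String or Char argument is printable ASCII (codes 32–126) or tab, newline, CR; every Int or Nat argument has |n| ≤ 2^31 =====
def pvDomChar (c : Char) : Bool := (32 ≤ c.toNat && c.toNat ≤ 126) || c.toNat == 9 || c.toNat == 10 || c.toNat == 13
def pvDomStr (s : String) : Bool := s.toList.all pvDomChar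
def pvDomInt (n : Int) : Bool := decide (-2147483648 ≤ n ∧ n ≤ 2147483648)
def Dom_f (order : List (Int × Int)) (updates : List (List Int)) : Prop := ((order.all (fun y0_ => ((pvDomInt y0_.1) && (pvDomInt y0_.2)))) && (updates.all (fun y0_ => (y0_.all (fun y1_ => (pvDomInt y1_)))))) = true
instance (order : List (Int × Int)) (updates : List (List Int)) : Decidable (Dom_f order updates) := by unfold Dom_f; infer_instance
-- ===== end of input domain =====

-- B replaces A's quadratic per-update pair scan by one reverse pass keeping a set of already-seen
-- later elements (last element excluded, as in A); objective: faster (O(m·n) vs O(m·n²)).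

-- ===== PORT A =====
-- inner 'for j in range(i+1, len(update)-1)' with its break: False at the first hit, else the flag
def fInnerJ (d : PySem.Dict Int Int) (u : List Int) (i : Int) : List Int → Bool → Bool
  | [], c => c
  | j :: rest, c =>
      if d.get? (PySem.List.pyGetD u i 0) == some (PySem.List.pyGetD u j 0) then false
      else fInnerJ d u i rest c

-- the 'correct' flag after both index loops
def fCorrect (d : PySem.Dict Int Int) (u : List Int) : Bool :=
  (PySem.List.pyRange 0 ((u.length : Int) - 1) 1).foldl
    (fun c i => fInnerJ d u i (PySem.List.pyRange (i + 1) ((u.length : Int) - 1) 1) c) true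

def f (order : List (Int × Int)) (updates : List (List Int)) : List (List Int) :=
  updates.foldl (fun acc u => if fCorrect (PySem.Dict.ofList order) u then acc ++ [u] else acc) []

-- ===== PORT B =====
-- 'order.get(x) in seen' (None is never in the int set)
def fHit (d : PySem.Dict Int Int) (seen : PySem.Set Int) (x : Int) : Bool :=
  match d.get? x with
  | some y => PySem.Set.contains seen y
  | none => false

-- 'for x in reversed(update[:-1]): …' with its break
def fScan (d : PySem.Dict Int Int) : List Int → PySem.Set Int → Bool
  | [], _ => true
  | x :: rest, seen =>
      if fHit d seen x then false
      else fScan d rest (PySem.Set.add seen x)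

def f_alt (order : List (Int × Int)) (updates : List (List Int)) : List (List Int) :=
  updates.foldl (fun acc u =>
    if fScan (PySem.Dict.ofList order) (PySem.List.slice u none (some (-1))).reverse PySem.Set.empty then acc ++ [u]
    else acc) []

-- ===== PRECONDITION & SPEC =====
def Spec_f (order : List (Int × Int)) (updates : List (List Int)) (out : List (List Int)) : Prop := out = f_alt order updates
instance (order : List (Int × Int)) (updates : List (List Int)) (out : List (List Int)) : Decidable (Spec_f order updates out) := by unfold Spec_f; infer_instance

-- ===== CLAIM (what is proved, stated in full; the proofs are below) =====
def Claim_equal_f : Prop := ∀ (order : List (Int × Int)) (updates : List (List Int)), Dom_f order updates → Spec_f order updates (f order updates)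

-- ===== LEMMAS AND PROOFS =====

theorem fInnerJ_eq_all (d : PySem.Dict Int Int) (u : List Int) (i : Int) :
    ∀ (js : List Int) (c : Bool), fInnerJ d u i js c
      = (c && js.all (fun j => !(d.get? (PySem.List.pyGetD u i 0) == some (PySem.List.pyGetD u j 0))))
  | [], c => by simp [fInnerJ]
  | j :: rest, c => by
      by_cases h : d.get? (PySem.List.pyGetD u i 0) == some (PySem.List.pyGetD u j 0)
      · simp [fInnerJ, h]
      · simp [fInnerJ, h, fInnerJ_eq_all d u i rest c]

theorem foldl_and_all (A : Int → Bool) :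
    ∀ (l : List Int) (c : Bool), l.foldl (fun c i => c && A i) c = (c && l.all A)
  | [], c => by simp
  | i :: rest, c => by simp [foldl_and_all A rest, Bool.and_assoc]

theorem fCorrect_iff_pairwise (d : PySem.Dict Int Int) (u : List Int) :
    fCorrect d u = true ↔ u.dropLast.Pairwise (fun a b => d.get? a ≠ some b) := by
  have hr : fCorrect d u
      = (PySem.List.pyRange 0 ((u.length : Int) - 1) 1).all (fun i =>
          (PySem.List.pyRange (i + 1) ((u.length : Int) - 1) 1).all (fun j =>
            !(d.get? (PySem.List.pyGetD u i 0) == some (PySem.List.pyGetD u j 0)))) := by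
    unfold fCorrect
    rw [show (fun (c : Bool) (i : Int) => fInnerJ d u i (PySem.List.pyRange (i + 1) ((u.length : Int) - 1) 1) c)
        = (fun c i => c && (PySem.List.pyRange (i + 1) ((u.length : Int) - 1) 1).all (fun j =>
            !(d.get? (PySem.List.pyGetD u i 0) == some (PySem.List.pyGetD u j 0)))) from
      funext fun c => funext fun i => fInnerJ_eq_all d u i _ c]
    rw [foldl_and_all]; simp
  rw [hr, List.pairwise_iff_getElem]
  have hlen : u.dropLast.length = u.length - 1 := List.length_dropLast
  simp only [List.all_eq_true, PySem.List.mem_pyRange_one, and_imp]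
  constructor
  · intro h p q hp hq hpq
    have := h (p : Int) (Int.natCast_nonneg p) (by omega) (q : Int) (by omega) (by omega)
    rw [PySem.List.pyGetD_natCast, PySem.List.pyGetD_natCast,
        List.getD_eq_getElem u 0 (show p < u.length by omega),
        List.getD_eq_getElem u 0 (show q < u.length by omega)] at this
    simpa [List.getElem_dropLast] using this
  · intro h i hi0 hi j hj0 hj
    have hiN : i.toNat < u.dropLast.length := by omega
    have hjN : j.toNat < u.dropLast.length := by omega
    have hh := h i.toNat j.toNat hiN hjN (by omega)
    have hi' : i = ((i.toNat : Nat) : Int) := by omega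
    have hj' : j = ((j.toNat : Nat) : Int) := by omega
    rw [hi', hj', PySem.List.pyGetD_natCast, PySem.List.pyGetD_natCast,
        List.getD_eq_getElem u 0 (show i.toNat < u.length by omega),
        List.getD_eq_getElem u 0 (show j.toNat < u.length by omega)]
    simpa [List.getElem_dropLast] using hh

theorem fScan_iff (d : PySem.Dict Int Int) :
    ∀ (l : List Int) (seen : PySem.Set Int), fScan d l seen = true ↔
      ((∀ x ∈ l, ∀ y, d.get? x = some y → y ∉ seen) ∧
        l.Pairwise (fun a b => d.get? b ≠ some a))
  | [], seen => by simp [fScan]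
  | x :: rest, seen => by
      have hhit : fHit d seen x = false ↔ (∀ y, d.get? x = some y → y ∉ seen) := by
        unfold fHit
        cases hg : d.get? x with
        | none => simp
        | some y => simp [PySem.Set.contains]
      by_cases h : fHit d seen x
      · simp only [fScan, h, if_true]
        constructor
        · intro hc; cases hc
        · rintro ⟨h1, -⟩
          exact absurd (hhit.mpr fun y hy => h1 x (by simp) y hy) (by simp [h])
      · have h' := hhit.mp (by simpa using h)
        simp only [fScan, h]
        rw [if_neg (by decide), fScan_iff d rest (PySem.Set.add seen x)]
        simp only [List.mem_cons, List.pairwise_cons, PySem.Set.mem_add]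
        constructor
        · rintro ⟨h1, h2⟩
          refine ⟨?_, ?_, h2⟩
          · rintro z (rfl | hz) y hy
            · exact h' y hy
            · intro hmem; exact h1 z hz y hy (Or.inl hmem)
          · intro b hb hbx
            exact h1 b hb x hbx (Or.inr rfl)
        · rintro ⟨h1, h2, h3⟩
          refine ⟨?_, h3⟩
          rintro z hz y hy (hmem | rfl)
          · exact h1 z (Or.inr hz) y hy hmem
          · exact h2 z hz hy

theorem fCorrect_eq_fScan (d : PySem.Dict Int Int) (u : List Int) :
    fCorrect d u = fScan d (PySem.List.slice u none (some (-1))).reverse PySem.Set.empty := by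
  rw [Bool.eq_iff_iff, fCorrect_iff_pairwise, PySem.List.slice_to_neg_one,
      fScan_iff d u.dropLast.reverse PySem.Set.empty, List.pairwise_reverse]
  constructor
  · intro h
    exact ⟨fun x _ y _ hy => by simp [PySem.Set.empty] at hy, h.imp fun h' => h'⟩
  · rintro ⟨-, h2⟩
    exact h2.imp fun h' => h'

theorem f_eq_f_alt (order : List (Int × Int)) (updates : List (List Int)) :
    f order updates = f_alt order updates := by
  unfold f f_alt
  rw [show (fun (acc : List (List Int)) (u : List Int) =>
        if fCorrect (PySem.Dict.ofList order) u then acc ++ [u] else acc)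
      = (fun (acc : List (List Int)) (u : List Int) =>
        if fScan (PySem.Dict.ofList order) (PySem.List.slice u none (some (-1))).reverse
            PySem.Set.empty then acc ++ [u] else acc) from
    funext fun acc => funext fun u => by rw [fCorrect_eq_fScan]]

-- ===== VERDICT (by name: the statement is the Claim_ definition above) =====
theorem f_spec : Claim_equal_f := by
  intro order updates _
  unfold Spec_f
  exact f_eq_f_alt order updates
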